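-- pv_equiv track=rewrite | github.com/zackattackz/AdventOfCode | py/_2024/_2/common.py | report_safe
-- ===== SOURCE A (Python) =====
-- def safe_distance(lv1, lv2):
--     diff = abs(lv1 - lv2)
--     return 1 <= diff <= 3
--
-- def safe_levels(lv1, lv2, inc):
--     if inc and lv1 > lv2:
--         return False
--     if not inc and lv1 < lv2:
--         return False
--     if not safe_distance(lv1, lv2):
--         return False
--     return True
--
-- def report_safe(report):
--     if len(report) < 2:
--         return True
--     if len(report) == 2:
--         return safe_distance(report[0], report[1])
--     inc = report[0] < report[1]
--     i, j = 0, 1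
--     while j < len(report):
--         if not safe_levels(report[i], report[j], inc):
--             return False
--         i += 1
--         j += 1
--     return True
-- ===== SOURCE B (Python) =====
-- def report_safe(report):
--     diffs = [report[k + 1] - report[k] for k in range(len(report) - 1)]
--     return all(1 <= d <= 3 for d in diffs) or all(-3 <= d <= -1 for d in diffs)
-- ===== Notes on version B (the rewrite author's own statement) =====
-- stated objective: simpler
-- what changed: Replaces the direction flag, length special-cases and two-index while loop by a derived list of consecutive differences checked for being all small positive steps or all small negative steps.
import Mathlib
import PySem

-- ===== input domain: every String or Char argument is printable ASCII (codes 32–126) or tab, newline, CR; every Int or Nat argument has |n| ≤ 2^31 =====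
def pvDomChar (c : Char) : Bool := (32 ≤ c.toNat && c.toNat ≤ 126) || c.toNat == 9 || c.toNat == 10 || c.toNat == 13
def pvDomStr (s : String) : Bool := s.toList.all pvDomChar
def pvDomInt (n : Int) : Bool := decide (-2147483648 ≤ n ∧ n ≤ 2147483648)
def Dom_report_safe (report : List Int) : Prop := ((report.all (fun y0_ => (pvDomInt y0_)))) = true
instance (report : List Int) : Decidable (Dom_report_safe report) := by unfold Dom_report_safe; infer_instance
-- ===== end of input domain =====

-- B replaces A's direction flag, length special-cases and index-pair while loop by a
-- derived list of consecutive differences checked for uniform small positive or negative steps; objective: simpler.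

-- ===== PORT A =====
def safe_distance (lv1 lv2 : Int) : Bool :=
  let diff := (lv1 - lv2).natAbs   -- Python abs on ints, exact
  decide (1 ≤ diff ∧ diff ≤ 3)

def safe_levels (lv1 lv2 : Int) (inc : Bool) : Bool :=
  if inc && decide (lv1 > lv2) then false
  else if !inc && decide (lv1 < lv2) then false
  else if !(safe_distance lv1 lv2) then false
  else true

-- the while loop over (i, j) = consecutive index pairs, as recursion on the remaining suffix
def report_safe_loop (inc : Bool) : List Int → Bool
  | x :: y :: t => if !(safe_levels x y inc) then false else report_safe_loop inc (y :: t)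
  | _ => true

def report_safe (report : List Int) : Bool :=
  if report.length < 2 then true
  else
    match report with
    | a :: b :: rest =>
      if report.length = 2 then safe_distance a b
      else
        let inc := decide (a < b)
        report_safe_loop inc (a :: b :: rest)
    | _ => true

-- ===== PORT B =====
def report_safe_alt (report : List Int) : Bool :=
  let diffs := List.zipWith (fun a b => b - a) report report.tail
  diffs.all (fun d => decide (1 ≤ d ∧ d ≤ 3)) || diffs.all (fun d => decide (-3 ≤ d ∧ d ≤ -1))

-- ===== PRECONDITION & SPEC =====
def Spec_report_safe (report : List Int) (out : Bool) : Prop := out = report_safe_alt report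
instance (report : List Int) (out : Bool) : Decidable (Spec_report_safe report out) := by unfold Spec_report_safe; infer_instance

-- ===== CLAIM (what is proved, stated in full; the proofs are below) =====
def Claim_equal_report_safe : Prop := ∀ (report : List Int), Dom_report_safe report → Spec_report_safe report (report_safe report)

-- ===== LEMMAS AND PROOFS =====

def pvDiffs (l : List Int) : List Int := List.zipWith (fun a b => b - a) l l.tail

lemma loop_true_eq (l : List Int) :
    report_safe_loop true l = (pvDiffs l).all (fun d => decide (1 ≤ d ∧ d ≤ 3)) := by
  induction l with
  | nil => rfl
  | cons x t ih =>
    cases t with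
    | nil => rfl
    | cons y t' =>
      simp only [report_safe_loop, pvDiffs, List.tail_cons, List.zipWith_cons_cons, List.all_cons]
      simp only [pvDiffs, List.tail_cons] at ih
      rw [ih]
      by_cases h : safe_levels x y true = true
      · have h' : (1 ≤ y - x ∧ y - x ≤ 3) := by
          simp [safe_levels, safe_distance] at h; omega
        rw [h, decide_eq_true h', Bool.true_and, Bool.not_true, if_neg Bool.false_ne_true]
      · have hb : safe_levels x y true = false := by simpa using h
        have h' : ¬(1 ≤ y - x ∧ y - x ≤ 3) := by
          simp [safe_levels, safe_distance] at hb; omega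
        rw [hb, decide_eq_false h']; simp

lemma loop_false_eq (l : List Int) :
    report_safe_loop false l = (pvDiffs l).all (fun d => decide (-3 ≤ d ∧ d ≤ -1)) := by
  induction l with
  | nil => rfl
  | cons x t ih =>
    cases t with
    | nil => rfl
    | cons y t' =>
      simp only [report_safe_loop, pvDiffs, List.tail_cons, List.zipWith_cons_cons, List.all_cons]
      simp only [pvDiffs, List.tail_cons] at ih
      rw [ih]
      by_cases h : safe_levels x y false = true
      · have h' : (-3 ≤ y - x ∧ y - x ≤ -1) := by
          simp [safe_levels, safe_distance] at h; omega
        rw [h, decide_eq_true h', Bool.true_and, Bool.not_true, if_neg Bool.false_ne_true]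
      · have hb : safe_levels x y false = false := by simpa using h
        have h' : ¬(-3 ≤ y - x ∧ y - x ≤ -1) := by
          simp [safe_levels, safe_distance] at hb; omega
        rw [hb, decide_eq_false h']; simp

-- ===== VERDICT (by name: the statement is the Claim_ definition above) =====
theorem report_safe_spec : Claim_equal_report_safe := by
  intro report _
  show report_safe report = report_safe_alt report
  match report with
  | [] => rfl
  | [_] => rfl
  | [a, b] =>
    have e : report_safe [a, b] =
        decide (1 ≤ (a - b).natAbs ∧ (a - b).natAbs ≤ 3) := by
      simp [report_safe, safe_distance]
    have e2 : report_safe_alt [a, b] =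
        (decide (1 ≤ b - a ∧ b - a ≤ 3) || decide (-3 ≤ b - a ∧ b - a ≤ -1)) := by
      simp [report_safe_alt]
    rw [e, e2]
    by_cases h1 : (1 ≤ b - a ∧ b - a ≤ 3)
    · have hA : (1 ≤ (a - b).natAbs ∧ (a - b).natAbs ≤ 3) := by omega
      rw [decide_eq_true h1, decide_eq_true hA, Bool.true_or]
    · by_cases h2 : (-3 ≤ b - a ∧ b - a ≤ -1)
      · have hA : (1 ≤ (a - b).natAbs ∧ (a - b).natAbs ≤ 3) := by omega
        rw [decide_eq_true h2, decide_eq_true hA, Bool.or_true]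
      · have hA : ¬(1 ≤ (a - b).natAbs ∧ (a - b).natAbs ≤ 3) := by omega
        rw [decide_eq_false h1, decide_eq_false h2, decide_eq_false hA]; rfl
  | a :: b :: c :: rest =>
    have hlen : ¬ ((a :: b :: c :: rest).length < 2) := by simp
    have hlen2 : (a :: b :: c :: rest).length ≠ 2 := by simp
    simp only [report_safe, hlen, if_false, hlen2, report_safe_alt]
    by_cases hab : a < b
    · have hneg : ¬ (-3 ≤ b - a ∧ b - a ≤ -1) := by omega
      simp only [hab, decide_true, loop_true_eq, pvDiffs, List.tail_cons,
        List.zipWith_cons_cons, List.all_cons]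
      rw [decide_eq_false hneg, Bool.false_and, Bool.or_false]
    · have hpos : ¬ (1 ≤ b - a ∧ b - a ≤ 3) := by omega
      simp only [hab, decide_false, loop_false_eq, pvDiffs, List.tail_cons,
        List.zipWith_cons_cons, List.all_cons]
      rw [decide_eq_false hpos, Bool.false_and, Bool.false_or]
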